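-- pv_equiv track=rewrite | github.com/jangyun-kim/coding-diary | 250328/흥미로운 숫자 2/interesting-numbers-2.py | is_interesting
-- ===== SOURCE A (Python) =====
-- def is_interesting(num):
--     num_str = str(num)
--     freq = [0] * 10
--
--     for ch in num_str:
--         digit = int(ch)
--         freq[digit] += 1
--
--     unique_digits = 0
--     counts = []
--
--     for f in freq:
--         if f > 0:
--             unique_digits += 1
--             counts.append(f)
--
--     if unique_digits != 2:
--         return False
--
--     counts.sort()
--     return counts[0] == 1 and counts[1] == len(num_str) - 1
-- ===== SOURCE B (Python) =====
-- def is_interesting(num):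
--     a = None
--     ca = 0
--     b = None
--     cb = 0
--     for ch in str(num):
--         d = int(ch)
--         if a is None:
--             a, ca = d, 1
--         elif d == a:
--             ca += 1
--         elif b is None:
--             b, cb = d, 1
--         elif d == b:
--             cb += 1
--         else:
--             return False
--     return b is not None and (ca == 1 or cb == 1)
-- ===== Notes on version B (the rewrite author's own statement) =====
-- stated objective: alternative
-- what changed: Replaces A's size-10 frequency table, collect-positive-counts pass and sort with a single streaming pass that tracks at most two seen digits and their counts in scalar accumulators and returns False early as soon as a third distinct digit appears.
import Mathlib
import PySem

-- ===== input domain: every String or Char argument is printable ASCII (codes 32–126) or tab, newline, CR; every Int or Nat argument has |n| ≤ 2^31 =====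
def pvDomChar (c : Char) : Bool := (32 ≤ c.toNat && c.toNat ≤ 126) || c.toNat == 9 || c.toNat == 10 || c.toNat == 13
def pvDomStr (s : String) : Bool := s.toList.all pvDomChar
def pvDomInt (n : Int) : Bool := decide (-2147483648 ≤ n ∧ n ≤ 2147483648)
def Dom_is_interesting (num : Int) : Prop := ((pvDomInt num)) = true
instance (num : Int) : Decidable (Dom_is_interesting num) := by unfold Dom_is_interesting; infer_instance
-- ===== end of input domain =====

-- B replaces A's size-10 frequency table, positive-count collection and sort with a single
-- streaming pass tracking at most two seen digits and their counts, returning False early on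
-- a third distinct digit (objective: alternative decomposition; no speed claim).

-- ===== PORT A =====
def is_interesting (num : Int) : Bool :=
  let numStr := PySem.Int.toStr num
  let freq := numStr.toList.foldl (fun (freq : List Int) ch =>
      match PySem.Int.ofChars? [ch] with
      | some d => PySem.List.pySetD freq d (PySem.List.pyGetD freq d 0 + 1)
      | none => freq)   -- none = int(ch) raises ValueError in Python; unreachable under Pre_
    (List.replicate 10 (0 : Int))
  let p := freq.foldl (fun (p : Int × List Int) f => if f > 0 then (p.1 + 1, p.2 ++ [f]) else p)
    ((0 : Int), ([] : List Int))
  if p.1 ≠ 2 then false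
  else
    let counts := PySem.List.sorted p.2 (fun x => x) false
    decide (PySem.List.pyGetD counts 0 0 = 1 ∧ PySem.List.pyGetD counts 1 0 = PySem.Str.len numStr - 1)

-- ===== PORT B =====
-- the for-loop of Source B with its early `return False`: structural recursion over the characters,
-- state (a, ca, b, cb) carried as arguments
def altLoop : List Char → Option Int → Int → Option Int → Int → Bool
  | [], _, ca, b, cb => b.isSome && (ca == 1 || cb == 1)
  | ch :: rest, a, ca, b, cb =>
    let d := (PySem.Int.ofChars? [ch]).getD 0
      -- .getD 0: int(ch) raises ValueError in Python on none; unreachable under Pre_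
    match a with
    | none => altLoop rest (some d) 1 b cb
    | some av =>
      if d == av then altLoop rest a (ca + 1) b cb
      else match b with
        | none => altLoop rest a ca (some d) 1
        | some bv => if d == bv then altLoop rest a ca b (cb + 1) else false

def is_interesting_alt (num : Int) : Bool :=
  altLoop (PySem.Int.toStr num).toList none 0 none 0

-- ===== PRECONDITION & SPEC =====
-- Pre_ excludes negative num, on which A raises ValueError (int('-') on the sign character).
def Pre_is_interesting (num : Int) : Prop := 0 ≤ num
instance (num : Int) : Decidable (Pre_is_interesting num) := by unfold Pre_is_interesting; infer_instance
def pvWitness_is_interesting : Int := (10)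
def Spec_is_interesting (num : Int) (out : Bool) : Prop := out = is_interesting_alt num
instance (num : Int) (out : Bool) : Decidable (Spec_is_interesting num out) := by unfold Spec_is_interesting; infer_instance

-- ===== CLAIM (what is proved, stated in full; the proofs are below) =====
def Claim_equal_is_interesting : Prop := ∀ (num : Int), Dom_is_interesting num → Pre_is_interesting num → Spec_is_interesting num (is_interesting num)

-- ===== LEMMAS AND PROOFS =====

-- the common characterisation both ports are reduced to: on the digit list ds,
-- "exactly two distinct digits and one of them occurs once"
def G (ds : List Int) : Bool :=
  if ((PySem.List.dedup ds).length : Int) ≠ 2 then false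
  else (PySem.List.dedup ds).any (fun d => PySem.List.count ds d == 1)

-- every character produced by str(num) for 0 ≤ num is a decimal digit, and int(ch) reads its value
lemma digitChar_ofChars (m : Nat) (hm : m < 10) :
    PySem.Int.ofChars? [Nat.digitChar m] = some (m : Int) := by
  interval_cases m <;> decide

lemma toDigitsCore_mem (f : Nat) : ∀ (n : Nat) (acc : List Char) (c : Char),
    c ∈ Nat.toDigitsCore 10 f n acc → c ∈ acc ∨ ∃ m, m < 10 ∧ c = Nat.digitChar m := by
  induction f with
  | zero => intro n acc c h; exact Or.inl h
  | succ f ih =>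
    intro n acc c h
    simp only [Nat.toDigitsCore] at h
    by_cases hz : n / 10 = 0
    · simp only [hz, if_true] at h
      rcases List.mem_cons.1 h with h | h
      · exact Or.inr ⟨n % 10, Nat.mod_lt _ (by omega), h⟩
      · exact Or.inl h
    · simp only [hz, if_false] at h
      rcases ih _ _ _ h with h | h
      · rcases List.mem_cons.1 h with h | h
        · exact Or.inr ⟨n % 10, Nat.mod_lt _ (by omega), h⟩
        · exact Or.inl h
      · exact Or.inr h

lemma chars_spec (num : Int) (h : 0 ≤ num) :
    ∀ c ∈ (PySem.Int.toStr num).toList, ∃ m : Nat, m < 10 ∧ PySem.Int.ofChars? [c] = some (m : Int) := by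
  intro c hc
  rw [PySem.Int.toList_toStr] at hc
  simp only [PySem.Int.toChars, if_neg (not_lt.2 h)] at hc
  rcases toDigitsCore_mem _ _ _ _ hc with h' | ⟨m, hm, rfl⟩
  · simp at h'
  · exact ⟨m, hm, digitChar_ofChars m hm⟩

lemma set_map_range (g : Nat → Int) (m : Nat) (hm : m < 10) (v : Int) :
    ((List.range 10).map g).set m v = (List.range 10).map (fun i => if i = m then v else g i) := by
  apply List.ext_getElem <;> simp
  intro i hi
  rcases eq_or_ne i m with rfl | hne
  · simp
  · simp [hne, Ne.symm hne]

lemma pySetD_natCast (xs : List Int) (m : Nat) (hm : m < xs.length) (v : Int) :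
    PySem.List.pySetD xs (m : Int) v = xs.set m v := by
  simp [PySem.List.pySetD, PySem.List.pySet?, PySem.List.pyIdx?, hm]

lemma freq_fold (ds : List Int) : ∀ (g : Nat → Int), (∀ d ∈ ds, ∃ m : Nat, m < 10 ∧ d = (m : Int)) →
    ds.foldl (fun freq d => PySem.List.pySetD freq d (PySem.List.pyGetD freq d 0 + 1))
      ((List.range 10).map g)
    = (List.range 10).map (fun i => g i + (ds.count (i : Int) : Int)) := by
  induction ds with
  | nil => intro g _; simp
  | cons d ds ih =>
    intro g hh
    obtain ⟨m, hm, rfl⟩ := hh d (List.mem_cons_self)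
    have hget : PySem.List.pyGetD ((List.range 10).map g) (m : Int) 0 = g m := by
      rw [PySem.List.pyGetD_natCast]
      exact PySem.List.getD_map_range g 10 m 0 hm
    rw [List.foldl_cons, hget, pySetD_natCast _ _ (by simp [hm]) _, set_map_range g m hm,
      ih _ (fun x hx => hh x (List.mem_cons_of_mem _ hx))]
    apply List.map_congr_left
    intro i hi
    simp only [List.mem_range] at hi
    rcases eq_or_ne i m with rfl | hne
    · simp
      omega
    · simp [List.count_cons, hne]
      omega

lemma pair_fold (l : List Int) : ∀ (a : Int) (acc : List Int),
    l.foldl (fun p f => if f > 0 then (p.1 + 1, p.2 ++ [f]) else p) (a, acc)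
    = (a + ((l.filter (fun f => f > 0)).length : Int), acc ++ l.filter (fun f => f > 0)) := by
  induction l with
  | nil => intro a acc; simp
  | cons x l ih =>
    intro a acc
    rw [List.foldl_cons]
    by_cases hx : x > 0
    · rw [if_pos hx, ih, List.filter_cons]
      simp [hx, Prod.ext_iff]
      omega
    · rw [if_neg hx, ih, List.filter_cons]
      simp [hx]

lemma sum_counts (ds : List Int) (hh : ∀ d ∈ ds, ∃ m : Nat, m < 10 ∧ d = (m : Int)) :
    ((List.range 10).map (fun i : Nat => (ds.count (i : Int) : Int))).sum = ds.length := by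
  induction ds with
  | nil => simp
  | cons d ds ih =>
    obtain ⟨m, hm, rfl⟩ := hh _ (List.mem_cons_self)
    have step : ((List.range 10).map (fun i : Nat => ((((m:Int)) :: ds).count (i : Int) : Int)))
        = (List.range 10).map (fun i : Nat => (ds.count (i : Int) : Int)
            + (if (fun j : Nat => (j : Int) == (m : Int)) i = true then 1 else 0)) := by
      apply List.map_congr_left
      intro i _
      simp only [List.count_cons, beq_iff_eq, Nat.cast_inj]
      split <;> simp_all; omega
    rw [step, PySem.List.sum_map_add_int, PySem.List.sum_map_ite_one_zero,
      ih (fun x hx => hh x (List.mem_cons_of_mem _ hx))]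
    have h1 : List.countP (fun j : Nat => (j : Int) == (m : Int)) (List.range 10)
        = List.count m (List.range 10) := by
      apply List.countP_congr
      intro i _
      simp
    rw [h1, List.count_eq_one_of_mem List.nodup_range (List.mem_range.2 hm)]
    simp

lemma sum_filter_pos (l : List Int) (h : ∀ x ∈ l, 0 ≤ x) :
    (l.filter (fun f => f > 0)).sum = l.sum := by
  induction l with
  | nil => simp
  | cons x l ih =>
    have hx := h x (List.mem_cons_self)
    by_cases hp : x > 0
    · simp [hp, ih (fun y hy => h y (List.mem_cons_of_mem _ hy))]
    · have : x = 0 := by omega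
      simp [this, ih (fun y hy => h y (List.mem_cons_of_mem _ hy))]

lemma sorted_pair (a b : Int) :
    PySem.List.sorted [a, b] (fun x => x) false = if a ≤ b then [a, b] else [b, a] := by
  by_cases hab : a ≤ b
  · rw [if_pos hab]
    apply PySem.List.sorted_eq_self_of_pairwise
    simpa using hab
  · rw [if_neg hab]
    apply PySem.List.sorted_id_eq_of_perm_of_pairwise
    · exact List.Perm.swap a b []
    · simpa using le_of_not_ge hab

lemma len_bridge (ds : List Int) (hdr : ∀ d ∈ ds, ∃ m : Nat, m < 10 ∧ d = (m : Int)) :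
    ((((List.range 10).map (fun i : Nat => (List.count (i : Int) ds : Int))).filter
        (fun f => f > 0)).length : Int)
    = ((PySem.List.dedup ds).length : Int) := by
  rw [List.filter_map]
  have hperm : (((List.range 10).filter
        ((fun f => f > 0) ∘ fun i : Nat => (List.count (i : Int) ds : Int))).map
        (fun i : Nat => (i : Int))).Perm (PySem.List.dedup ds) := by
    apply (List.perm_ext_iff_of_nodup ?_ (PySem.List.nodup_dedup ds)).2
    · intro x
      simp only [List.mem_map, List.mem_filter, List.mem_range, Function.comp,
        PySem.List.mem_dedup, gt_iff_lt, decide_eq_true_eq]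
      constructor
      · rintro ⟨i, ⟨_, hpos⟩, rfl⟩
        exact List.count_pos_iff.1 (by exact_mod_cast hpos)
      · intro hx
        obtain ⟨m, hm, rfl⟩ := hdr x hx
        exact ⟨m, ⟨hm, by exact_mod_cast List.count_pos_iff.2 hx⟩, rfl⟩
    · exact ((List.nodup_range).filter _).map (fun a b => by exact_mod_cast id)
  rw [List.length_map, ← List.length_map (f := fun i : Nat => (i : Int)), hperm.length_eq]

lemma mem_one (ds : List Int) (hdr : ∀ d ∈ ds, ∃ m : Nat, m < 10 ∧ d = (m : Int)) :
    (1 : Int) ∈ (((List.range 10).map (fun i : Nat => (List.count (i : Int) ds : Int))).filter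
        (fun f => f > 0))
    ↔ ∃ d ∈ ds, List.count d ds = 1 := by
  simp only [List.mem_filter, List.mem_map, List.mem_range, gt_iff_lt, decide_eq_true_eq]
  constructor
  · rintro ⟨⟨i, hi, hcnt⟩, _⟩
    have h1 : List.count ((i : Int)) ds = 1 := by exact_mod_cast hcnt
    exact ⟨(i : Int), List.count_pos_iff.1 (by omega), h1⟩
  · rintro ⟨d, hd, hcnt⟩
    obtain ⟨m, hm, rfl⟩ := hdr d hd
    exact ⟨⟨m, hm, by exact_mod_cast hcnt⟩, by norm_num⟩

lemma sum_pair (ds : List Int) (hdr : ∀ d ∈ ds, ∃ m : Nat, m < 10 ∧ d = (m : Int)) :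
    (((List.range 10).map (fun i : Nat => (List.count (i : Int) ds : Int))).filter
        (fun f => f > 0)).sum = (ds.length : Int) := by
  rw [sum_filter_pos _ (by rintro x hx; obtain ⟨i, -, rfl⟩ := List.mem_map.1 hx; positivity),
    sum_counts ds hdr]

lemma branch_eq (ds : List Int) (hdr : ∀ d ∈ ds, ∃ m : Nat, m < 10 ∧ d = (m : Int))
    (hlen : ((((List.range 10).map (fun i : Nat => (List.count (i : Int) ds : Int))).filter
        (fun f => f > 0)).length : Int) = 2) :
    decide (PySem.List.pyGetD (PySem.List.sorted
        (((List.range 10).map (fun i : Nat => (List.count (i : Int) ds : Int))).filter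
          (fun f => f > 0)) (fun x => x) false) 0 0 = 1
      ∧ PySem.List.pyGetD (PySem.List.sorted
        (((List.range 10).map (fun i : Nat => (List.count (i : Int) ds : Int))).filter
          (fun f => f > 0)) (fun x => x) false) 1 0 = (ds.length : Int) - 1)
    = (PySem.List.dedup ds).any (fun d => PySem.List.count ds d == 1) := by
  set C := (((List.range 10).map (fun i : Nat => (List.count (i : Int) ds : Int))).filter
      (fun f => f > 0)) with hCdef
  obtain ⟨a, b, hC⟩ := List.length_eq_two.1 (by exact_mod_cast hlen)
  have hpos : ∀ x ∈ C, 0 < x := by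
    intro x hx
    have := (List.mem_filter.1 hx).2
    simpa using this
  have ha : 0 < a := hpos a (hC ▸ List.mem_cons_self)
  have hb : 0 < b := hpos b (hC ▸ List.mem_cons_of_mem _ List.mem_cons_self)
  have hsum : a + b = (ds.length : Int) := by
    have := sum_pair ds hdr
    rw [← hCdef, hC] at this
    simpa using this
  have h1 : ((1 : Int) ∈ C) ↔ ∃ d ∈ ds, List.count d ds = 1 := mem_one ds hdr
  rw [hC] at h1
  rw [hC, sorted_pair, Bool.eq_iff_iff]
  simp only [List.any_eq_true, PySem.List.count_eq, beq_iff_eq, PySem.List.mem_dedup,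
    decide_eq_true_eq]
  rw [← h1]
  simp only [List.mem_cons, List.not_mem_nil, or_false]
  by_cases hab : a ≤ b
  · rw [if_pos hab]
    simp only [PySem.List.pyGetD_ofNat']
    simp only [List.getD_cons_succ, List.getD_cons_zero]
    constructor
    · rintro ⟨rfl, -⟩; left; rfl
    · rintro (rfl | rfl) <;> omega
  · rw [if_neg hab]
    simp only [PySem.List.pyGetD_ofNat']
    simp only [List.getD_cons_succ, List.getD_cons_zero]
    constructor
    · rintro ⟨rfl, -⟩; right; rfl
    · rintro (rfl | rfl) <;> omega

-- A's port reduced to the common characterisation G on the digit list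
lemma A_char (num : Int) (hpre : 0 ≤ num) :
    is_interesting num
      = G ((PySem.Int.toStr num).toList.map (fun ch => (PySem.Int.ofChars? [ch]).getD 0)) := by
  have hcs := chars_spec num hpre
  simp only [is_interesting, G]
  set cs := (PySem.Int.toStr num).toList with hcsdef
  set ds := cs.map (fun ch => (PySem.Int.ofChars? [ch]).getD 0) with hdsdef
  have hdr : ∀ d ∈ ds, ∃ m : Nat, m < 10 ∧ d = (m : Int) := by
    intro d hd
    obtain ⟨ch, hch, rfl⟩ := List.mem_map.1 hd
    obtain ⟨m, hm, he⟩ := hcs ch hch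
    exact ⟨m, hm, by simp [he]⟩
  have hfold1 : cs.foldl (fun (freq : List Int) ch =>
      match PySem.Int.ofChars? [ch] with
      | some d => PySem.List.pySetD freq d (PySem.List.pyGetD freq d 0 + 1)
      | none => freq) (List.replicate 10 (0 : Int))
      = (List.range 10).map (fun i : Nat => (List.count (i : Int) ds : Int)) := by
    have hmap : ds.foldl (fun freq d => PySem.List.pySetD freq d (PySem.List.pyGetD freq d 0 + 1))
        (List.replicate 10 (0 : Int))
        = cs.foldl (fun (freq : List Int) ch =>
            match PySem.Int.ofChars? [ch] with
            | some d => PySem.List.pySetD freq d (PySem.List.pyGetD freq d 0 + 1)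
            | none => freq) (List.replicate 10 (0 : Int)) := by
      rw [hdsdef, List.foldl_map]
      apply PySem.List.foldl_congr_mem
      intro acc ch hch
      obtain ⟨m, hm, he⟩ := hcs ch hch
      simp [he]
    have hinit : (List.replicate 10 (0 : Int)) = (List.range 10).map (fun _ => (0 : Int)) := by
      simp [List.map_const']
    rw [← hmap, hinit, freq_fold ds (fun _ => 0) hdr]
    simp
  rw [hfold1, pair_fold]
  simp only [zero_add, List.nil_append]
  rw [PySem.Str.len_eq, ← hcsdef]
  have hlencs : (cs.length : Int) = (ds.length : Int) := by rw [hdsdef]; simp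
  rw [hlencs, len_bridge ds hdr]
  by_cases hq : ((PySem.List.dedup ds).length : Int) = 2
  · rw [if_neg (by simpa using hq), if_neg (by simpa using hq)]
    exact branch_eq ds hdr ((len_bridge ds hdr).trans hq)
  · rw [if_pos (by simpa using hq), if_pos (by simpa using hq)]

-- ------- B side -------

-- Source B's loop restated on the already-converted digit list
def altLoopD : List Int → Option Int → Int → Option Int → Int → Bool
  | [], _, ca, b, cb => b.isSome && (ca == 1 || cb == 1)
  | d :: rest, a, ca, b, cb =>
    match a with
    | none => altLoopD rest (some d) 1 b cb
    | some av =>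
      if d == av then altLoopD rest a (ca + 1) b cb
      else match b with
        | none => altLoopD rest a ca (some d) 1
        | some bv => if d == bv then altLoopD rest a ca b (cb + 1) else false

lemma altLoop_eq_altLoopD : ∀ (cs : List Char) (a : Option Int) (ca : Int) (b : Option Int) (cb : Int),
    altLoop cs a ca b cb
      = altLoopD (cs.map (fun ch => (PySem.Int.ofChars? [ch]).getD 0)) a ca b cb := by
  intro cs
  induction cs with
  | nil => intro a ca b cb; rfl
  | cons ch rest ih =>
    intro a ca b cb
    simp only [altLoop, altLoopD, List.map_cons]
    cases a with
    | none => exact ih _ _ _ _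
    | some av =>
      by_cases hd : ((PySem.Int.ofChars? [ch]).getD 0) == av
      · simp [hd, ih]
      · cases b with
        | none => simp [hd, ih]
        | some bv =>
          by_cases hb : ((PySem.Int.ofChars? [ch]).getD 0) == bv <;> simp [hd, hb, ih]

lemma nodup_all_eq {α : Type} (l : List α) (x : α) (hn : l.Nodup) (hall : ∀ y ∈ l, y = x)
    (hx : x ∈ l) : l = [x] := by
  cases l with
  | nil => simp at hx
  | cons a t =>
    have ha : a = x := hall a List.mem_cons_self
    cases t with
    | nil => simp [ha]
    | cons b t' =>
      have hb : b = x := hall b (List.mem_cons_of_mem _ List.mem_cons_self)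
      subst ha; subst hb
      simp at hn

lemma dedup_length_eq_card (ds : List Int) :
    (PySem.List.dedup ds).length = ds.toFinset.card := by
  rw [← List.toFinset_card_of_nodup (PySem.List.nodup_dedup ds)]
  congr 1
  apply Finset.ext
  intro x
  simp [List.mem_toFinset]

lemma G_perm (ds ds' : List Int) (h : ds.Perm ds') : G ds = G ds' := by
  unfold G
  have hlen : (PySem.List.dedup ds).length = (PySem.List.dedup ds').length := by
    rw [dedup_length_eq_card, dedup_length_eq_card, List.toFinset_eq_of_perm _ _ h]
  rw [hlen]
  by_cases hq : ((PySem.List.dedup ds').length : Int) ≠ 2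
  · rw [if_pos hq, if_pos hq]
  · rw [if_neg hq, if_neg hq, Bool.eq_iff_iff]
    simp only [List.any_eq_true, PySem.List.mem_dedup, PySem.List.count_eq]
    constructor
    · rintro ⟨x, hx, hc⟩
      exact ⟨x, h.mem_iff.1 hx, by rwa [← h.count_eq]⟩
    · rintro ⟨x, hx, hc⟩
      exact ⟨x, h.mem_iff.2 hx, by rwa [h.count_eq]⟩

lemma G_two_reps (av bv : Int) (hne : av ≠ bv) (ka kb : Nat) (hka : 1 ≤ ka) (hkb : 1 ≤ kb) :
    G (List.replicate ka av ++ List.replicate kb bv)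
      = ((ka == 1) || (kb == 1)) := by
  unfold G
  set ds := List.replicate ka av ++ List.replicate kb bv with hds
  have hmem : ∀ x, x ∈ ds ↔ x = av ∨ x = bv := by
    intro x
    simp [hds, List.mem_replicate]
    constructor
    · rintro (⟨-, h⟩ | ⟨-, h⟩) <;> [exact Or.inl h; exact Or.inr h]
    · rintro (rfl | rfl) <;> [exact Or.inl ⟨by omega, rfl⟩; exact Or.inr ⟨by omega, rfl⟩]
  have hcount_av : ds.count av = ka := by
    simp [hds, List.count_append, List.count_replicate, Ne.symm hne]
  have hcount_bv : ds.count bv = kb := by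
    simp [hds, List.count_append, List.count_replicate, hne]
  have hcard : ds.toFinset = {av, bv} := by
    apply Finset.ext
    intro x
    simp [List.mem_toFinset, hmem]
  have hlen : (PySem.List.dedup ds).length = 2 := by
    rw [dedup_length_eq_card, hcard]
    rw [Finset.card_insert_of_notMem (by simp [hne]), Finset.card_singleton]
  rw [if_neg (by rw [hlen]; norm_num)]
  rw [Bool.eq_iff_iff]
  simp only [List.any_eq_true, PySem.List.mem_dedup, PySem.List.count_eq, beq_iff_eq,
    Bool.or_eq_true]
  constructor
  · rintro ⟨x, hx, hc⟩
    rcases (hmem x).1 hx with rfl | rfl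
    · left; rw [hcount_av] at hc; exact_mod_cast hc
    · right; rw [hcount_bv] at hc; exact_mod_cast hc
  · rintro (h | h)
    · exact ⟨av, (hmem av).2 (Or.inl rfl), by rw [hcount_av]; exact_mod_cast h⟩
    · exact ⟨bv, (hmem bv).2 (Or.inr rfl), by rw [hcount_bv]; exact_mod_cast h⟩

lemma G_three (ds : List Int) (x y z : Int) (hx : x ∈ ds) (hy : y ∈ ds) (hz : z ∈ ds)
    (hxy : x ≠ y) (hxz : x ≠ z) (hyz : y ≠ z) : G ds = false := by
  unfold G
  rw [if_pos]
  intro h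
  have h2 : (PySem.List.dedup ds).length = 2 := by exact_mod_cast h
  have hsub : ({x, y, z} : Finset Int) ⊆ ds.toFinset := by
    intro a ha
    simp only [Finset.mem_insert, Finset.mem_singleton] at ha
    rcases ha with rfl | rfl | rfl <;> simp [List.mem_toFinset, hx, hy, hz]
  have hc3 : ({x, y, z} : Finset Int).card = 3 := by
    rw [Finset.card_insert_of_notMem (by simp [hxy, hxz]),
      Finset.card_insert_of_notMem (by simp [hyz]), Finset.card_singleton]
  have := Finset.card_le_card hsub
  rw [hc3, ← dedup_length_eq_card, h2] at this
  omega

lemma two_state (rest : List Int) : ∀ (av bv ca cb : Int), av ≠ bv → 1 ≤ ca → 1 ≤ cb →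
    altLoopD rest (some av) ca (some bv) cb
      = G (List.replicate ca.toNat av ++ List.replicate cb.toNat bv ++ rest) := by
  induction rest with
  | nil =>
    intro av bv ca cb hne hca hcb
    simp only [altLoopD, List.append_nil, Option.isSome_some, Bool.true_and]
    rw [G_two_reps av bv hne ca.toNat cb.toNat (by omega) (by omega)]
    have h1 : (ca == 1) = (ca.toNat == 1) := by
      rw [Bool.eq_iff_iff]; simp; omega
    have h2 : (cb == 1) = (cb.toNat == 1) := by
      rw [Bool.eq_iff_iff]; simp; omega
    rw [h1, h2]
  | cons d rest ih =>
    intro av bv ca cb hne hca hcb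
    simp only [altLoopD]
    by_cases hd : d = av
    · subst hd
      rw [if_pos (by simp), ih _ _ _ _ hne (by omega) hcb]
      apply G_perm
      apply List.perm_iff_count.2
      intro x
      have h1 : (ca + 1).toNat = ca.toNat + 1 := by omega
      simp [List.count_append, List.count_cons, List.count_replicate, h1]
      split_ifs <;> omega
    · rw [if_neg (by simp [hd])]
      by_cases hdb : d = bv
      · subst hdb
        rw [if_pos (by simp), ih _ _ _ _ hne hca (by omega)]
        apply G_perm
        apply List.perm_iff_count.2
        intro x
        have h1 : (cb + 1).toNat = cb.toNat + 1 := by omega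
        simp [List.count_append, List.count_cons, List.count_replicate, h1]
        split_ifs <;> omega
      · rw [if_neg (by simp [hdb])]
        symm
        exact G_three _ av bv d (by simp [List.mem_replicate]; omega)
          (by simp [List.mem_replicate]; omega) (by simp) hne (Ne.symm hd) (Ne.symm hdb)

lemma one_state (rest : List Int) : ∀ (av ca : Int), 1 ≤ ca →
    altLoopD rest (some av) ca none 0
      = G (List.replicate ca.toNat av ++ rest) := by
  induction rest with
  | nil =>
    intro av ca hca
    simp only [altLoopD, List.append_nil, Option.isSome_none, Bool.false_and]
    unfold G
    rw [if_pos]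
    have : PySem.List.dedup (List.replicate ca.toNat av) = [av] := by
      apply nodup_all_eq _ av (PySem.List.nodup_dedup _)
      · intro y hy
        rw [PySem.List.mem_dedup] at hy
        exact (List.eq_of_mem_replicate hy)
      · rw [PySem.List.mem_dedup, List.mem_replicate]
        exact ⟨by omega, rfl⟩
    rw [this]
    norm_num
  | cons d rest ih =>
    intro av ca hca
    simp only [altLoopD]
    by_cases hd : d = av
    · subst hd
      rw [if_pos (by simp), ih _ _ (by omega)]
      apply G_perm
      apply List.perm_iff_count.2
      intro x
      have h1 : (ca + 1).toNat = ca.toNat + 1 := by omega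
      simp [List.count_append, List.count_cons, List.count_replicate, h1]
      split_ifs <;> omega
    · rw [if_neg (by simp [hd])]
      rw [two_state rest av d ca 1 (Ne.symm hd) hca (by omega)]
      congr 1
      simp

-- B's port reduced to the common characterisation G on the digit list
lemma B_char (num : Int) :
    is_interesting_alt num
      = G ((PySem.Int.toStr num).toList.map (fun ch => (PySem.Int.ofChars? [ch]).getD 0)) := by
  unfold is_interesting_alt
  rw [altLoop_eq_altLoopD]
  set ds := (PySem.Int.toStr num).toList.map (fun ch => (PySem.Int.ofChars? [ch]).getD 0) with hds
  clear_value ds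
  cases ds with
  | nil => simp [altLoopD, G, PySem.List.dedup]
  | cons d rest =>
    simp only [altLoopD]
    rw [one_state rest d 1 le_rfl]
    simp

-- ===== VERDICT (by name: the statement is the Claim_ definition above) =====
theorem is_interesting_spec : Claim_equal_is_interesting := by
  intro num _ hpre
  unfold Spec_is_interesting
  rw [A_char num hpre, B_char num]
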